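-- pv_equiv track=rewrite | github.com/yanghaha0908/EE208 | app.py | get_Hamming
-- ===== SOURCE A (Python) =====
-- def get_Hamming(p):#得到Hamming码####
--     hamming = ''
--     for i in p:
--         if i==2:
--             hamming += '0010'
--         elif i==3:
--             hamming += '0011'
--         elif i==1:
--             hamming += '0001'
--         elif i==0:
--             hamming += '0000'
--         elif i==4:
--             hamming += '0100'
--         elif i==5:
--             hamming += '0101'
--         elif i==6:
--             hamming += '0110'
--         elif i==7:
--             hamming += '0111'
--         elif i==8:
--             hamming += '1000'
--         elif i==9:
--             hamming += '1001'
--     return hamming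
-- ===== SOURCE B (Python) =====
-- def get_Hamming(p):
--     # Pack every digit's 4-bit code into one big integer behind a sentinel top bit,
--     # then read the whole answer off that integer's binary expansion at the end.
--     n = 1
--     for i in p:
--         if 0 <= i <= 9:
--             n = n * 16 + i
--     return format(n, 'b')[1:]
-- ===== Notes on version B (the rewrite author's own statement) =====
-- stated objective: alternative
-- what changed: Instead of appending a 4-character string per digit, B packs all digits into a single big integer (n = n*16 + i behind a sentinel top bit) and produces the whole output at once as that integer's binary expansion with the sentinel bit stripped; out-of-range values simply leave the accumulator unchanged.
import Mathlib
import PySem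

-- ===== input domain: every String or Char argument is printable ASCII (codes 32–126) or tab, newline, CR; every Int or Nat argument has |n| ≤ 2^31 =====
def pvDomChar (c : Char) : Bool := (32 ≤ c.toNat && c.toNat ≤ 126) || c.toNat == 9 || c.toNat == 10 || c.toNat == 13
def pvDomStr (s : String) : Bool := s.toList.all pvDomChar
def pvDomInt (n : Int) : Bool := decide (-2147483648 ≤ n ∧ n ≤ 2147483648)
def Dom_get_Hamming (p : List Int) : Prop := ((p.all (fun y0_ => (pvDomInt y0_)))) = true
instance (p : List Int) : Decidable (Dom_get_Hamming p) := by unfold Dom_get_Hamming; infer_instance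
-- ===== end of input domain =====

-- B packs all digit codes into one big integer (n = n*16 + i behind a sentinel bit) and emits
-- its binary expansion once at the end, instead of A's per-digit string appends (objective: alternative).

-- ===== PORT A =====
-- the body of A's for-loop (the if/elif chain), as the foldl step
def pvStep (hamming : String) (i : Int) : String :=
  if i == 2 then hamming ++ "0010"
  else if i == 3 then hamming ++ "0011"
  else if i == 1 then hamming ++ "0001"
  else if i == 0 then hamming ++ "0000"
  else if i == 4 then hamming ++ "0100"
  else if i == 5 then hamming ++ "0101"
  else if i == 6 then hamming ++ "0110"
  else if i == 7 then hamming ++ "0111"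
  else if i == 8 then hamming ++ "1000"
  else if i == 9 then hamming ++ "1001"
  else hamming

def get_Hamming (p : List Int) : String :=
  p.foldl pvStep ""

-- ===== PORT B =====
-- the body of B's for-loop: fold the digit into the big-integer accumulator
def pvStepB (n : Int) (i : Int) : Int :=
  if 0 ≤ i ∧ i ≤ 9 then n * 16 + i else n

-- format(n, 'b') for a nonnegative int: minimal binary digits, most significant first ([] for 0)
def pvToBin (n : Nat) : List Char :=
  if h : n = 0 then []
  else pvToBin (n / 2) ++ [if n % 2 == 1 then '1' else '0']
  decreasing_by exact Nat.div_lt_self (Nat.pos_of_ne_zero h) (by norm_num)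

-- format(n,'b')[1:] : n starts at 1, so its binary form is '1' followed by the answer
def get_Hamming_alt (p : List Int) : String :=
  String.ofList ((pvToBin (p.foldl pvStepB 1).toNat).drop 1)

-- ===== PRECONDITION & SPEC =====
def Spec_get_Hamming (p : List Int) (out : String) : Prop := out = get_Hamming_alt p
instance (p : List Int) (out : String) : Decidable (Spec_get_Hamming p out) := by unfold Spec_get_Hamming; infer_instance

-- ===== CLAIM (what is proved, stated in full; the proofs are below) =====
def Claim_equal_get_Hamming : Prop := ∀ (p : List Int), Dom_get_Hamming p → Spec_get_Hamming p (get_Hamming p)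

-- ===== LEMMAS AND PROOFS =====

-- the 4-character code A appends for a digit, "" otherwise
def pvCode (i : Int) : String :=
  if i == 2 then "0010"
  else if i == 3 then "0011"
  else if i == 1 then "0001"
  else if i == 0 then "0000"
  else if i == 4 then "0100"
  else if i == 5 then "0101"
  else if i == 6 then "0110"
  else if i == 7 then "0111"
  else if i == 8 then "1000"
  else if i == 9 then "1001"
  else ""

lemma pvStep_eq (acc : String) (i : Int) : pvStep acc i = acc ++ pvCode i := by
  unfold pvStep
  split_ifs with h1 h2 h3 h4 h5 h6 h7 h8 h9 h10 <;> simp_all [pvCode]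

lemma pvFold_shift (l : List Int) (acc : String) :
    l.foldl pvStep acc = acc ++ l.foldl pvStep "" := by
  induction l generalizing acc with
  | nil => simp
  | cons i t ih =>
    simp only [List.foldl_cons]
    rw [pvStep_eq, ih (acc ++ pvCode i), pvStep_eq "" i, ih ("" ++ pvCode i)]
    simp [String.append_assoc]

lemma toBin_double (m b : Nat) (hm : 1 ≤ m) (hb : b < 2) :
    pvToBin (2 * m + b) = pvToBin m ++ [if b == 1 then '1' else '0'] := by
  rw [pvToBin]
  have hne : ¬(2 * m + b = 0) := by omega
  rw [dif_neg hne]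
  have h1 : (2 * m + b) / 2 = m := by omega
  have h2 : (2 * m + b) % 2 = b := by omega
  rw [h1, h2]

lemma toBin_nibble (m : Nat) (hm : 1 ≤ m) (i : Nat) (hi : i < 16) :
    pvToBin (16 * m + i) = pvToBin m ++
      [if i / 8 == 1 then '1' else '0',
       if i / 4 % 2 == 1 then '1' else '0',
       if i / 2 % 2 == 1 then '1' else '0',
       if i % 2 == 1 then '1' else '0'] := by
  have e1 : 16 * m + i = 2 * (8 * m + i / 2) + i % 2 := by omega
  rw [e1, toBin_double _ _ (by omega) (by omega)]
  have e2 : 8 * m + i / 2 = 2 * (4 * m + i / 4) + i / 2 % 2 := by omega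
  rw [e2, toBin_double _ _ (by omega) (by omega)]
  have e3 : 4 * m + i / 4 = 2 * (2 * m + i / 8) + i / 4 % 2 := by omega
  rw [e3, toBin_double _ _ (by omega) (by omega)]
  have e4 : 2 * m + i / 8 = 2 * m + i / 8 / 1 := by omega
  have e5 : 2 * m + i / 8 = 2 * m + (i / 8) := rfl
  have hb : i / 8 < 2 := by omega
  rw [show 2 * m + i / 8 = 2 * m + (i / 8) from rfl, toBin_double m (i / 8) hm hb]
  simp

-- folding a digit into the accumulator appends exactly A's 4-character code to the binary form
lemma toBin_digit (n : Int) (hn : 1 ≤ n) (i : Int) (h0 : 0 ≤ i) (h9 : i ≤ 9) :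
    pvToBin (n * 16 + i).toNat = pvToBin n.toNat ++ (pvCode i).toList := by
  have hm : 1 ≤ n.toNat := by omega
  have e : (n * 16 + i).toNat = 16 * n.toNat + i.toNat := by omega
  rw [e]
  interval_cases i <;>
    · rw [toBin_nibble n.toNat hm _ (by norm_num)]
      rfl

lemma pvMain (p : List Int) (n : Int) (hn : 1 ≤ n) :
    pvToBin (p.foldl pvStepB n).toNat = pvToBin n.toNat ++ (p.foldl pvStep "").toList := by
  induction p generalizing n with
  | nil => simp
  | cons i t ih =>
    simp only [List.foldl_cons]
    by_cases h : 0 ≤ i ∧ i ≤ 9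
    · have hs : pvStepB n i = n * 16 + i := by simp [pvStepB, h]
      have hn' : 1 ≤ n * 16 + i := by nlinarith [h.1]
      rw [hs, ih _ hn', toBin_digit n hn i h.1 h.2]
      rw [pvStep_eq "" i, pvFold_shift t ("" ++ pvCode i)]
      simp
    · have hs : pvStepB n i = n := by simp [pvStepB, h]
      rw [hs, ih _ hn]
      rw [pvStep_eq "" i, pvFold_shift t ("" ++ pvCode i)]
      have hc : pvCode i = "" := by
        unfold pvCode
        split_ifs with h2 h3 h1 hz h4 h5 h6 h7 h8 h9 <;>
          first | rfl | (exfalso; simp only [beq_iff_eq] at *; omega)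
      simp [hc]

-- ===== VERDICT (by name: the statement is the Claim_ definition above) =====
theorem get_Hamming_spec : Claim_equal_get_Hamming := by
  intro p _
  show get_Hamming p = get_Hamming_alt p
  unfold get_Hamming get_Hamming_alt
  rw [pvMain p 1 (by norm_num)]
  have h1 : pvToBin (Int.toNat 1) = ['1'] := by
    rw [pvToBin]; rw [dif_neg (by norm_num)]; rw [pvToBin]; rfl
  rw [h1]
  simp [String.ofList_toList]
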